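-- pv_equiv track=rewrite | github.com/jerrt2003/leetcode-in-python | 高頻面經/Google/Google Phone Interview/Valid String.py | validString
-- ===== SOURCE A (Python) =====
-- def validString(str):
--     curMax = ord('A')
--     for i in range(len(str)):
--         if i == 0 and ord(str[i]) != ord('A'):
--             return False
--         elif ord(str[i]) > curMax+1:
--             return False
--         curMax = max(ord(str[i]), curMax)
--     return True
-- ===== SOURCE B (Python) =====
-- def validString(str):
--     if not str:
--         return True
--     if str[0] != 'A':
--         return False
--     ords = [ord(c) for c in str]
--     pm = []
--     m = ord('A')
--     for o in ords:
--         pm.append(m)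
--         m = max(m, o)
--     return all(o <= p + 1 for o, p in zip(ords, pm))
-- ===== Notes on version B (the rewrite author's own statement) =====
-- stated objective: alternative
-- what changed: Replaces the single interleaved update-and-check loop with early returns by a table-based two-pass version: a prefix-maximum table is built first, then a separate all() pass validates each character against its table entry.
import Mathlib
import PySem

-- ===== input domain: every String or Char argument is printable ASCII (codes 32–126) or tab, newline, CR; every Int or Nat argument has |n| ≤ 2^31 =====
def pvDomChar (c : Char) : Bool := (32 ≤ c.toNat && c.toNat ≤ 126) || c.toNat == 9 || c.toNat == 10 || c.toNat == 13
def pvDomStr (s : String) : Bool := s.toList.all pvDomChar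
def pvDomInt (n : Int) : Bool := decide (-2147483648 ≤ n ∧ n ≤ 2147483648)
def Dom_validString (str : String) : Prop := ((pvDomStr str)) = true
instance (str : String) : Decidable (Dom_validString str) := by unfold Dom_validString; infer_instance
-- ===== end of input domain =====

-- B builds an explicit prefix-maximum table and validates in a separate pass, instead of A's interleaved update-and-check loop (alternative decomposition, same cost).
-- ===== PORT A =====
def validStringGo : List Char → Nat → Int → Bool
  | [], _, _ => true
  | c :: rest, i, curMax =>
    if i = 0 ∧ (c.toNat : Int) ≠ 65 then false
    else if (c.toNat : Int) > curMax + 1 then false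
    else validStringGo rest (i + 1) (max (c.toNat : Int) curMax)

def validString (str : String) : Bool := validStringGo str.toList 0 65

-- ===== PORT B =====
def buildPm : List Int → Int → List Int
  | [], _ => []
  | o :: rest, m => m :: buildPm rest (max m o)

def validString_alt (str : String) : Bool :=
  match str.toList with
  | [] => true
  | c :: _ =>
    if c ≠ 'A' then false
    else
      let ords := str.toList.map (fun ch => (ch.toNat : Int))
      let pm := buildPm ords 65
      (ords.zip pm).all (fun p => p.1 ≤ p.2 + 1)

-- ===== PRECONDITION & SPEC =====
def Spec_validString (str : String) (out : Bool) : Prop := out = validString_alt str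
instance (str : String) (out : Bool) : Decidable (Spec_validString str out) := by unfold Spec_validString; infer_instance

-- ===== CLAIM (what is proved, stated in full; the proofs are below) =====
def Claim_equal_validString : Prop := ∀ (str : String), Dom_validString str → Spec_validString str (validString str)

-- ===== LEMMAS AND PROOFS =====
theorem go_nil (i : Nat) (m : Int) : validStringGo [] i m = true := rfl

theorem go_cons (c : Char) (rest : List Char) (i : Nat) (m : Int) :
    validStringGo (c :: rest) i m =
      if i = 0 ∧ (c.toNat : Int) ≠ 65 then false
      else if (c.toNat : Int) > m + 1 then false
      else validStringGo rest (i + 1) (max (c.toNat : Int) m) := rfl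

theorem go_eq_table (cs : List Char) (m : Int) (i : Nat) (hi : i ≠ 0) :
    validStringGo cs i m =
      ((cs.map (fun ch => (ch.toNat : Int))).zip
        (buildPm (cs.map (fun ch => (ch.toNat : Int))) m)).all (fun p => p.1 ≤ p.2 + 1) := by
  induction cs generalizing m i with
  | nil => simp [go_nil, buildPm]
  | cons c rest ih =>
    rw [go_cons, if_neg (by simp [hi])]
    simp only [List.map_cons, buildPm, List.zip_cons_cons, List.all_cons]
    by_cases h : (c.toNat : Int) > m + 1
    · simp [h, not_le.mpr h]
    · rw [if_neg h, ih _ (i + 1) (Nat.succ_ne_zero i), max_comm]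
      simp [not_lt.mp h]

-- ===== VERDICT (by name: the statement is the Claim_ definition above) =====
theorem validString_spec : Claim_equal_validString := by
  intro str _
  unfold Spec_validString validString validString_alt
  cases hcs : str.toList with
  | nil => simp [go_nil]
  | cons c rest =>
    dsimp only
    by_cases hA : c = 'A'
    · subst hA
      have h65 : ('A'.toNat : Int) = 65 := by decide
      rw [go_cons, if_neg (by simp), if_neg (by rw [h65]; norm_num), if_neg (by simp)]
      rw [go_eq_table rest (max ('A'.toNat : Int) 65) 1 one_ne_zero]
      simp only [List.map_cons, buildPm, List.zip_cons_cons, List.all_cons, h65, max_self]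
      norm_num
    · rw [if_pos (by simpa using hA)]
      have hne : ((c.toNat : Int)) ≠ 65 := by
        intro h
        apply hA
        have h' : c.toNat = 65 := by exact_mod_cast h
        exact Char.ext (UInt32.toNat_inj.mp (h'.trans (by decide)))
      rw [go_cons, if_pos ⟨rfl, hne⟩]
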